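-- pv_equiv track=rewrite | github.com/crh5914/RevRec | util.py | generate_test_batch
-- ===== SOURCE A (Python) =====
-- def generate_test_batch(users,items,rs,batch_size=256):
--     batch_u,batch_i,batch_r = [],[],[]
--     for u,i,r in zip(users,items,rs):
--         batch_u.append(u)
--         batch_i.append(i)
--         batch_r.append(r)
--         if len(batch_u) == batch_size:
--             yield batch_u,batch_i,batch_r
--             batch_u,batch_i,batch_r = [],[],[]
--     if len(batch_u) > 0:
--         yield batch_u,batch_i,batch_r
-- ===== SOURCE B (Python) =====
-- def generate_test_batch(users, items, rs, batch_size=256):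
--     data = list(zip(users, items, rs))
--     while data:
--         chunk = data[:batch_size]
--         data = data[batch_size:]
--         yield ([u for u, _, _ in chunk],
--                [i for _, i, _ in chunk],
--                [r for _, _, r in chunk])
-- ===== Notes on version B (the rewrite author's own statement) =====
-- stated objective: alternative
-- what changed: B zips the three streams into one list and peels fixed-size chunks off its front by slicing, unzipping each chunk with comprehensions, instead of A's per-element accumulation into three parallel lists with a length check and a final tail flush.
-- outside the precondition, e.g. on generate_test_batch([1], [2], [3], 0): A returns [([1], [2], [3])], B does not finish within the time limit; on generate_test_batch([1], [2], [3], -1): A returns [([1], [2], [3])], B does not finish within the time limit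
import Mathlib
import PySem

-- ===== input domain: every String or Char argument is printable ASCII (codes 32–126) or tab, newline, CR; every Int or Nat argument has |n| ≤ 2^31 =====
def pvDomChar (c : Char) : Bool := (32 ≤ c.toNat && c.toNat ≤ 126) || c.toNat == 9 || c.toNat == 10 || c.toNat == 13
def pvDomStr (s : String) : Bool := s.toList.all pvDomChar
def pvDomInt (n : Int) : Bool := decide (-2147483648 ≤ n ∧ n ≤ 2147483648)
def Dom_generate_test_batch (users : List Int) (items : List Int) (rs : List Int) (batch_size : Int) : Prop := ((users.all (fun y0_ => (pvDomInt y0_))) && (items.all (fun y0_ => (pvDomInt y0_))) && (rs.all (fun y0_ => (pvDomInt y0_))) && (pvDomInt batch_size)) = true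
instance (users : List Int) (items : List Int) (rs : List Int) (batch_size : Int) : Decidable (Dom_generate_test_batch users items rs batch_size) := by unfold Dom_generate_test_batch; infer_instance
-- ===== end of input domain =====

-- B chunks a single zipped list by slicing instead of A's per-element accumulation with a tail flush;
-- equivalence is claimed for batch_size ≥ 1 (Pre_).


-- ===== PORT A =====
-- the generator's yields collected in order; the for-loop over zip(users,items,rs) is goA
def goA (b : Int) : List (Int × Int × Int) → List Int → List Int → List Int → List (List Int × List Int × List Int)
  | [], bu, bi, br => if bu.length > 0 then [(bu, bi, br)] else []
  | t :: rest, bu, bi, br =>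
    let bu' := bu ++ [t.1]
    let bi' := bi ++ [t.2.1]
    let br' := br ++ [t.2.2]
    if (bu'.length : Int) = b then (bu', bi', br') :: goA b rest [] [] []
    else goA b rest bu' bi' br'

def generate_test_batch (users : List Int) (items : List Int) (rs : List Int) (batch_size : Int) : List (List Int × List Int × List Int) :=
  goA batch_size (users.zip (items.zip rs)) [] [] []

-- ===== PORT B =====
-- the while-loop of Source B; fuel (initial list length) only makes the recursion total:
-- it is never exhausted when batch_size ≥ 1 (Python loops forever when batch_size ≤ 0)
def goB (b : Int) : Nat → List (Int × Int × Int) → List (List Int × List Int × List Int)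
  | _, [] => []
  | 0, _ :: _ => []
  | fuel + 1, t :: rest' =>
    let data := t :: rest'
    let chunk := PySem.List.slice data none (some b)
    let rest := PySem.List.slice data (some b) none
    (chunk.map (·.1), chunk.map (·.2.1), chunk.map (·.2.2)) :: goB b fuel rest

def generate_test_batch_alt (users : List Int) (items : List Int) (rs : List Int) (batch_size : Int) : List (List Int × List Int × List Int) :=
  let data := users.zip (items.zip rs)
  goB batch_size data.length data

-- ===== PRECONDITION & SPEC =====
-- Pre_ excludes batch_size ≤ 0 with all three lists nonempty: A's equality test never fires there so it
-- returns everything as one batch, while B's slicing loop makes no progress and does not terminate (diverges).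
def Pre_generate_test_batch (users : List Int) (items : List Int) (rs : List Int) (batch_size : Int) : Prop := 1 ≤ batch_size ∨ users = [] ∨ items = [] ∨ rs = []
instance (users : List Int) (items : List Int) (rs : List Int) (batch_size : Int) : Decidable (Pre_generate_test_batch users items rs batch_size) := by unfold Pre_generate_test_batch; infer_instance
def pvWitness_generate_test_batch : List Int × List Int × List Int × Int := ([1, 2, 3], [4, 5, 6], [7, 8, 9], 2)

def Spec_generate_test_batch (users : List Int) (items : List Int) (rs : List Int) (batch_size : Int) (out : List (List Int × List Int × List Int)) : Prop := out = generate_test_batch_alt users items rs batch_size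
instance (users : List Int) (items : List Int) (rs : List Int) (batch_size : Int) (out : List (List Int × List Int × List Int)) : Decidable (Spec_generate_test_batch users items rs batch_size out) := by unfold Spec_generate_test_batch; infer_instance

-- ===== CLAIM (what is proved, stated in full; the proofs are below) =====
def Claim_equal_generate_test_batch : Prop := ∀ (users : List Int) (items : List Int) (rs : List Int) (batch_size : Int), Dom_generate_test_batch users items rs batch_size → Pre_generate_test_batch users items rs batch_size → Spec_generate_test_batch users items rs batch_size (generate_test_batch users items rs batch_size)

-- ===== LEMMAS AND PROOFS =====
lemma goB_cons (b : Int) (f : Nat) (x : Int × Int × Int) (xs : List (Int × Int × Int)) :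
    goB b (f + 1) (x :: xs) =
      ((PySem.List.slice (x :: xs) none (some b)).map (·.1),
       (PySem.List.slice (x :: xs) none (some b)).map (·.2.1),
       (PySem.List.slice (x :: xs) none (some b)).map (·.2.2)) ::
        goB b f (PySem.List.slice (x :: xs) (some b) none) := rfl

lemma goA_eq_goB (b : Int) (hb : 1 ≤ b) :
    ∀ (data p : List (Int × Int × Int)) (fuel : Nat),
      (p ++ data).length ≤ fuel → (p.length : Int) < b →
      goA b data (p.map (·.1)) (p.map (·.2.1)) (p.map (·.2.2)) = goB b fuel (p ++ data) := by
  intro data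
  induction data with
  | nil =>
    intro p fuel hfuel hlt
    cases p with
    | nil => simp [goA]; cases fuel <;> simp [goB]
    | cons q qs =>
      have hlen : (q :: qs).length ≤ b.toNat := by omega
      cases fuel with
      | zero => simp at hfuel
      | succ f =>
        simp only [List.append_nil] at *
        rw [show goB b (f + 1) (q :: qs) = ((PySem.List.slice (q :: qs) none (some b)).map (·.1), (PySem.List.slice (q :: qs) none (some b)).map (·.2.1), (PySem.List.slice (q :: qs) none (some b)).map (·.2.2)) :: goB b f (PySem.List.slice (q :: qs) (some b) none) from rfl]
        rw [PySem.List.slice_to _ (by omega), PySem.List.slice_from _ (by omega)]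
        rw [List.take_of_length_le hlen, List.drop_eq_nil_of_le hlen]
        simp [goA, goB]
  | cons t rest ih =>
    intro p fuel hfuel hlt
    by_cases hfull : ((p.length : Int) + 1 = b)
    · have hblen : b.toNat = p.length + 1 := by omega
      cases fuel with
      | zero => simp at hfuel
      | succ f =>
        have hstep : p ++ t :: rest = (p ++ [t]) ++ rest := by simp
        rw [hstep]
        obtain ⟨a, as, hp⟩ : ∃ a as, (p ++ [t]) ++ rest = a :: as := by
          cases p <;> exact ⟨_, _, rfl⟩
        rw [hp, goB_cons, ← hp]
        rw [PySem.List.slice_to _ (by omega), PySem.List.slice_from _ (by omega)]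
        have htake : ((p ++ [t]) ++ rest).take b.toNat = p ++ [t] := by
          rw [hblen, show p.length + 1 = (p ++ [t]).length by simp, List.take_left]
        have hdrop : ((p ++ [t]) ++ rest).drop b.toNat = rest := by
          rw [hblen, show p.length + 1 = (p ++ [t]).length by simp, List.drop_left]
        rw [htake, hdrop]
        have hA : goA b (t :: rest) (p.map (·.1)) (p.map (·.2.1)) (p.map (·.2.2)) =
            ((p ++ [t]).map (·.1), (p ++ [t]).map (·.2.1), (p ++ [t]).map (·.2.2)) :: goA b rest [] [] [] := by
          simp only [goA, List.map_append, List.map_cons, List.map_nil]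
          rw [if_pos (by simp; omega)]
        rw [hA]
        have := ih [] f (by simp only [List.length_append, List.length_cons, List.nil_append] at hfuel ⊢; omega) (by simpa using hb)
        simpa using this
    · have hA : goA b (t :: rest) (p.map (·.1)) (p.map (·.2.1)) (p.map (·.2.2)) =
          goA b rest ((p ++ [t]).map (·.1)) ((p ++ [t]).map (·.2.1)) ((p ++ [t]).map (·.2.2)) := by
        simp only [goA, List.map_append, List.map_cons, List.map_nil]
        rw [if_neg (by simp; omega)]
      rw [hA, show p ++ t :: rest = (p ++ [t]) ++ rest by simp]
      exact ih (p ++ [t]) fuel (by simpa using hfuel) (by simp; omega)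

-- ===== VERDICT (by name: the statement is the Claim_ definition above) =====
theorem generate_test_batch_spec : Claim_equal_generate_test_batch := by
  intro users items rs batch_size _hdom hpre
  unfold Spec_generate_test_batch generate_test_batch generate_test_batch_alt
  rcases hpre with hb | h | h | h
  · simpa using goA_eq_goB batch_size hb (users.zip (items.zip rs)) [] (users.zip (items.zip rs)).length (by simp) (by exact_mod_cast hb)
  all_goals simp [h, goA, goB]
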